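-- pv_equiv track=rewrite | github.com/jimmymalhan/local-agent-runtime | agents/input_validator.py | sanitize_sql_string
-- ===== SOURCE A (Python) =====
-- def sanitize_sql_string(value: str) -> str:
--     """Escape characters commonly used in SQL injection.
--
--     This is a *defense-in-depth* helper — always prefer parameterized queries.
--     """
--     replacements = {
--         "'": "''",
--         "\\": "\\\\",
--         "\x00": "",
--         "\n": "\\n",
--         "\r": "\\r",
--         "\x1a": "\\Z",
--     }
--     for char, escaped in replacements.items():
--         value = value.replace(char, escaped)
--     return value
-- ===== SOURCE B (Python) =====
-- def sanitize_sql_string(value: str) -> str: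
--     """Escape characters commonly used in SQL injection (single pass)."""
--     replacements = {
--         "'": "''",
--         "\\": "\\\\",
--         "\x00": "",
--         "\n": "\\n",
--         "\r": "\\r",
--         "\x1a": "\\Z",
--     }
--     out = []
--     for ch in value:
--         out.append(replacements.get(ch, ch))
--     return "".join(out)
-- ===== Notes on version B (the rewrite author's own statement) =====
-- stated objective: idiomatic
-- what changed: Replaces six sequential full-string .replace passes by one character-by-character pass that appends each character's (possibly empty) escape from the table and joins once; valid because no escape sequence contains a character targeted by a later replace.
import Mathlib
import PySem

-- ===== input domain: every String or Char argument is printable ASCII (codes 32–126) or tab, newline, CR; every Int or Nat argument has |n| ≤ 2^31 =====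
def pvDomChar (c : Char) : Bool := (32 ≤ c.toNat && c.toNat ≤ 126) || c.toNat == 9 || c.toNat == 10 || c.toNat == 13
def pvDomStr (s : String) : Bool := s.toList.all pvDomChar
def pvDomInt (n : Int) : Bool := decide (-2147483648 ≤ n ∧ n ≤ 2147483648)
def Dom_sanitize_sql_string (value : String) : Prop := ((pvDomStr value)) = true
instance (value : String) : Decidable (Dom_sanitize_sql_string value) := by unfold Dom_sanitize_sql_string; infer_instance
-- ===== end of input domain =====

-- B makes one character-by-character pass with an escape table instead of A's six sequential full-string replaces (idiomatic single pass).

-- ===== PORT A =====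
-- A iterates over the replacement dict's items, doing value = value.replace(char, escaped) for each.
def sanitize_sql_string (value : String) : String :=
  ([("'", "''"), ("\\", "\\\\"), ("\x00", ""), ("\n", "\\n"), ("\r", "\\r"), ("\x1a", "\\Z")] :
      List (String × String)).foldl (fun v p => PySem.Str.replace v p.1 p.2) value

-- ===== PORT B =====
-- replacements.get(ch, ch) as an if-chain over the same six keys ("" for NUL).
def sqlEscapeChar (c : Char) : List Char :=
  if c = '\'' then ['\'', '\'']
  else if c = '\\' then ['\\', '\\']
  else if c = '\x00' then []
  else if c = '\n' then ['\\', 'n']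
  else if c = '\r' then ['\\', 'r']
  else if c = '\x1a' then ['\\', 'Z']
  else [c]

def sanitize_sql_string_alt (value : String) : String :=
  String.ofList (value.toList.flatMap sqlEscapeChar)

-- ===== PRECONDITION & SPEC =====
def Spec_sanitize_sql_string (value : String) (out : String) : Prop := out = sanitize_sql_string_alt value
instance (value : String) (out : String) : Decidable (Spec_sanitize_sql_string value out) := by unfold Spec_sanitize_sql_string; infer_instance

-- ===== CLAIM (what is proved, stated in full; the proofs are below) =====
def Claim_equal_sanitize_sql_string : Prop := ∀ (value : String), Dom_sanitize_sql_string value → Spec_sanitize_sql_string value (sanitize_sql_string value)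

-- ===== LEMMAS AND PROOFS =====

lemma pv_str_eq_of_toList (a : String) (l : List Char) (h : a.toList = l) :
    a = String.ofList l := by
  subst h; exact String.ofList_toList.symm

-- single-character pattern: replace is a flatMap over the characters
def pvEsc (c0 : Char) (new : List Char) (c : Char) : List Char :=
  if c = c0 then new else [c]

lemma replace_go_single (c0 : Char) (new : List Char) :
    ∀ (fuel : Nat) (l acc : List Char), l.length ≤ fuel →
      PySem.Chars.replace.go [c0] new fuel l acc
        = acc.reverse ++ l.flatMap (pvEsc c0 new) := by
  intro fuel
  induction fuel with
  | zero =>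
      intro l acc h
      have : l = [] := List.eq_nil_of_length_eq_zero (Nat.le_zero.mp h)
      subst this
      simp [PySem.Chars.replace.go]
  | succ n ih =>
      intro l acc h
      cases l with
      | nil => simp [PySem.Chars.replace.go]
      | cons c t =>
          by_cases hc : c = c0
          · subst hc
            have hpre : List.isPrefixOf [c] (c :: t) = true := by
              simp [List.isPrefixOf]
            simp only [PySem.Chars.replace.go, hpre, if_pos]
            rw [ih]
            · simp [pvEsc]
            · simpa using Nat.le_of_succ_le_succ h
          · have hpre : List.isPrefixOf [c0] (c :: t) = false := by
              simp [List.isPrefixOf]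
              exact fun h' => absurd h'.symm hc
            simp only [PySem.Chars.replace.go, hpre, Bool.false_eq_true, if_false]
            rw [ih t (c :: acc) (Nat.le_of_succ_le_succ h)]
            simp [pvEsc, hc]

lemma replace_single (c0 : Char) (new cs : List Char) :
    PySem.Chars.replace cs [c0] new = cs.flatMap (pvEsc c0 new) := by
  simp only [PySem.Chars.replace, List.isEmpty_cons, Bool.false_eq_true, if_false]
  exact replace_go_single c0 new cs.length cs [] (le_refl _)

-- the six escape rules applied in A's order to one character give B's table entry
lemma chain_single (c : Char) :
    List.flatMap (pvEsc '\x1a' ['\\', 'Z'])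
      (List.flatMap (pvEsc '\x0d' ['\\', 'r'])
        (List.flatMap (pvEsc '\n' ['\\', 'n'])
          (List.flatMap (pvEsc '\x00' [])
            (List.flatMap (pvEsc '\\' ['\\', '\\']) (pvEsc '\'' ['\'', '\''] c)))))
      = sqlEscapeChar c := by
  by_cases h1 : c = '\''
  · subst h1; decide
  by_cases h2 : c = '\\'
  · subst h2; decide
  by_cases h3 : c = '\x00'
  · subst h3; decide
  by_cases h4 : c = '\n'
  · subst h4; decide
  by_cases h5 : c = '\r'
  · subst h5; decide
  by_cases h6 : c = '\x1a'
  · subst h6; decide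
  simp [pvEsc, sqlEscapeChar, h1, h2, h3, h4, h5, h6]

-- ===== VERDICT (by name: the statement is the Claim_ definition above) =====
theorem sanitize_sql_string_spec : Claim_equal_sanitize_sql_string := by
  intro value _
  show _ = _
  unfold sanitize_sql_string sanitize_sql_string_alt
  simp only [List.foldl]
  apply pv_str_eq_of_toList
  simp only [PySem.Str.toList_replace]
  rw [show ("'".toList) = ['\''] from rfl, show ("\\".toList) = ['\\'] from rfl,
      show ("\x00".toList) = ['\x00'] from rfl, show ("\n".toList) = ['\n'] from rfl,
      show ("\r".toList) = ['\r'] from rfl, show ("\x1a".toList) = ['\x1a'] from rfl,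
      show ("''".toList) = ['\'', '\''] from rfl, show ("\\\\".toList) = ['\\', '\\'] from rfl,
      show ("".toList) = ([] : List Char) from rfl, show ("\\n".toList) = ['\\', 'n'] from rfl,
      show ("\\r".toList) = ['\\', 'r'] from rfl, show ("\\Z".toList) = ['\\', 'Z'] from rfl]
  simp only [replace_single, List.flatMap_assoc]
  congr 1
  funext c
  rw [← chain_single c]
  simp only [List.flatMap_assoc]
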